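-- pv_equiv track=rewrite | github.com/kewin1807/extract_ID_Card | helper.py | find_index_upper
-- ===== SOURCE A (Python) =====
-- def find_index_upper(line):
--     count = 0
--     for index, c in enumerate(line):
--         if c.isupper():
--             count += 1
--         if count == 2:
--             return index
--     return -1
-- ===== SOURCE B (Python) =====
-- def find_index_upper(line):
--     ups = [i for i, c in enumerate(line) if c.isupper()]
--     return ups[1] if len(ups) >= 2 else -1
-- ===== Notes on version B (the rewrite author's own statement) =====
-- stated objective: simpler
-- what changed: Replaces the counter-with-early-exit loop by a two-phase collect-then-select: gather all uppercase indices in one comprehension, then pick the second if it exists.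
import Mathlib
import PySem

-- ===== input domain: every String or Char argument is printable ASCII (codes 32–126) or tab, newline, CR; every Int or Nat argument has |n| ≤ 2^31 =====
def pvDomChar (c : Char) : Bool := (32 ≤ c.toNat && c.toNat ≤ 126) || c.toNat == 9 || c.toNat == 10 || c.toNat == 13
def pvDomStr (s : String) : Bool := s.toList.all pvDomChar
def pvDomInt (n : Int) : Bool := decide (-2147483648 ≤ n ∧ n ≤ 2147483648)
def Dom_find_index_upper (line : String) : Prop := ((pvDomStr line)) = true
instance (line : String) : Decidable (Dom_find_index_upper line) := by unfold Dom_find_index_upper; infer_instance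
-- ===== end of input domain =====

-- B replaces A's counter-with-early-exit loop by collect-all-uppercase-indices then pick the second (simpler decomposition).

-- ===== PORT A =====
-- the for-loop over enumerate(line) with a running count and early return
def findIdxUpperLoop : List (Int × Char) → Int → Int
  | [], _ => -1
  | (index, c) :: rest, count =>
    let count := if PySem.Chars.isupper c then count + 1 else count
    if count = 2 then index else findIdxUpperLoop rest count

def find_index_upper (line : String) : Int :=
  findIdxUpperLoop (PySem.List.enumerate line.toList 0) 0

-- ===== PORT B =====
def find_index_upper_alt (line : String) : Int :=
  let ups := ((PySem.List.enumerate line.toList 0).filter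
      (fun p => PySem.Chars.isupper p.2)).map (·.1)
  if 2 ≤ ups.length then PySem.List.pyGetD ups 1 (-1) else -1

-- ===== PRECONDITION & SPEC =====
def Spec_find_index_upper (line : String) (out : Int) : Prop := out = find_index_upper_alt line
instance (line : String) (out : Int) : Decidable (Spec_find_index_upper line out) := by unfold Spec_find_index_upper; infer_instance

-- ===== CLAIM (what is proved, stated in full; the proofs are below) =====
def Claim_equal_find_index_upper : Prop := ∀ (line : String), Dom_find_index_upper line → Spec_find_index_upper line (find_index_upper line)

-- ===== LEMMAS AND PROOFS =====

-- A's loop with count c ∈ {0,1} returns the (2-c)-th upper index (getD default -1)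
theorem findIdxUpperLoop_eq (l : List (Int × Char)) :
    ∀ c : Int, 0 ≤ c → c ≤ 1 →
      findIdxUpperLoop l c =
        ((l.filter (fun p => PySem.Chars.isupper p.2)).map (·.1)).getD (1 - c).toNat (-1) := by
  induction l with
  | nil => intro c _ _; simp [findIdxUpperLoop]
  | cons hd tl ih =>
    intro c h0 h1
    obtain ⟨i, x⟩ := hd
    by_cases hx : PySem.Chars.isupper x
    · by_cases hc : c = 1
      · subst hc
        simp [findIdxUpperLoop, hx]
      · have hc0 : c = 0 := by omega
        subst hc0
        simp only [findIdxUpperLoop, hx, if_true, zero_add]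
        rw [if_neg (by omega), ih 1 (by omega) (by omega)]
        simp [hx, List.getD]
    · simp only [findIdxUpperLoop, hx]
      norm_num
      rw [if_neg (by omega), ih c h0 h1]
      simp [hx]

-- ===== VERDICT (by name: the statement is the Claim_ definition above) =====
theorem find_index_upper_spec : Claim_equal_find_index_upper := by
  intro line _
  unfold Spec_find_index_upper find_index_upper find_index_upper_alt
  rw [findIdxUpperLoop_eq _ 0 (by omega) (by omega)]
  set ups := ((PySem.List.enumerate line.toList 0).filter
      (fun p => PySem.Chars.isupper p.2)).map (·.1) with hups
  by_cases h : 2 ≤ ups.length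
  · rw [if_pos h]
    have h1 : (1 : Nat) < ups.length := by omega
    simp [PySem.List.pyGetD, PySem.List.pyGet?, PySem.List.pyIdx?, h1, List.getD]
  · rw [if_neg h]
    have : ups.length ≤ 1 := by omega
    simp [List.getD, List.getElem?_eq_none (by omega : ups.length ≤ 1)]
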